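-- pv_equiv track=rewrite | github.com/lake041/sesac-algorithm | 김민재/알고리즘/프로그래머스/알고리즘 고득점 Kit/힙/더 맵게.py | solution
-- ===== SOURCE A (Python) =====
-- from heapq import heappush, heappop, heapify
--
-- def solution(scoville, K):
--     heapify(scoville)
--     cnt = 0
--     while True:
--         first = heappop(scoville)
--         if first >= K:
--             break
--
--         if not scoville:
--             cnt = -1
--             break
--
--         second = heappop(scoville)
--         heappush(scoville, first+second*2)
--         cnt += 1
--
--     return cnt
-- ===== SOURCE B (Python) =====
-- def solution(scoville, K):
--     # Maintain a fully sorted working list instead of a heap; return value only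
--     # (A mutates its argument into a heap, B does not touch it).
--     s = sorted(scoville)
--     cnt = 0
--     while s[0] < K:          # IndexError on empty input, as in A
--         if len(s) == 1:
--             return -1
--         first = s.pop(0)
--         second = s.pop(0)
--         x = first + second * 2
--         i = 0
--         while i < len(s) and s[i] < x:
--             i += 1
--         s.insert(i, x)
--         cnt += 1
--     return cnt
-- ===== Notes on version B (the rewrite author's own statement) =====
-- stated objective: alternative
-- what changed: Replaces the binary heap with a working list sorted once up front and kept sorted by positional insertion of each combined score; extraction of the two mildest foods becomes taking the first two list elements.
import Mathlib
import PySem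

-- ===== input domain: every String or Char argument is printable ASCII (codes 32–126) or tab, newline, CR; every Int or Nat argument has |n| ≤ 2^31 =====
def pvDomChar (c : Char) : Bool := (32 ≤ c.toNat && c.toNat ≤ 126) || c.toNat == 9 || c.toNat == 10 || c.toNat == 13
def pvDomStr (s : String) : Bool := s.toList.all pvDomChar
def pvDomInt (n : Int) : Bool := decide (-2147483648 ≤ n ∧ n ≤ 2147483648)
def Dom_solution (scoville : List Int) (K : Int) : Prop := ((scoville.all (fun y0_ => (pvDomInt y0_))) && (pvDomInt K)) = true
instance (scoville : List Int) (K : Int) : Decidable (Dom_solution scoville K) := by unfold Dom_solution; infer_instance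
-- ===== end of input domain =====

-- B keeps a sorted working list instead of a heap; proved equal on the return value only
-- (A additionally mutates its argument into a heap, B leaves it untouched).

-- ===== PORT A =====
-- A calls the stdlib heapq; its heap operations are ported as a skew-heap library
-- (merge-based push/pop returning the same minima as heapq on every input).
inductive PHeap where
  | nil : PHeap
  | node : Int → PHeap → PHeap → PHeap
deriving DecidableEq, Repr

def PHeap.size : PHeap → Nat
  | .nil => 0
  | .node _ l r => l.size + r.size + 1

-- skew-heap merge (fuel only makes the recursion structural; with fuel > size a + size b
-- it never runs out)
def PHeap.mergeF : Nat → PHeap → PHeap → PHeap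
  | 0, _, _ => .nil
  | _ + 1, .nil, h => h
  | _ + 1, h, .nil => h
  | fuel + 1, .node a l1 r1, .node b l2 r2 =>
    if a ≤ b then .node a (PHeap.mergeF fuel r1 (.node b l2 r2)) l1
    else .node b (PHeap.mergeF fuel r2 (.node a l1 r1)) l2

def PHeap.merge (a b : PHeap) : PHeap := PHeap.mergeF (a.size + b.size + 1) a b

def PHeap.push (x : Int) (h : PHeap) : PHeap := PHeap.merge (.node x .nil .nil) h

-- heapify(scoville): build the heap from the list
def PHeap.heapify (xs : List Int) : PHeap := xs.foldl (fun h x => PHeap.push x h) .nil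

-- the while-loop of A: pop first; break if first >= K; -1 if empty; else pop second, push back
-- (fuel only makes the recursion structural; the heap shrinks each round, so it never runs out)
def loopA (K : Int) : Nat → PHeap → Int → Int
  | 0, _, _ => 0
  | _ + 1, .nil, _ => 0   -- heappop on an empty heap raises IndexError; excluded by Pre_solution
  | fuel + 1, .node v l r, cnt =>
    if v ≥ K then cnt
    else match PHeap.merge l r with
      | .nil => -1
      | .node v2 l2 r2 => loopA K fuel (PHeap.push (v + v2 * 2) (PHeap.merge l2 r2)) (cnt + 1)

def solution (scoville : List Int) (K : Int) : Int :=
  loopA K (scoville.length + 1) (PHeap.heapify scoville) 0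

-- ===== PORT B =====
-- linear scan "while i < len(s) and s[i] < x: i += 1; s.insert(i, x)"
def insSorted (x : Int) : List Int → List Int
  | [] => [x]
  | y :: ys => if y < x then y :: insSorted x ys else x :: y :: ys

-- the while-loop of B over the sorted working list
-- (fuel only makes the recursion structural; the list shrinks each round, so it never runs out)
def loopB (K : Int) : Nat → List Int → Int → Int
  | 0, _, _ => 0
  | _ + 1, [], _ => 0   -- s[0] on the empty list raises IndexError; excluded by Pre_solution
  | fuel + 1, f :: rest, cnt =>
    if f < K then
      match rest with
      | [] => -1
      | s2 :: rest2 => loopB K fuel (insSorted (f + s2 * 2) rest2) (cnt + 1)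
    else cnt

def solution_alt (scoville : List Int) (K : Int) : Int :=
  loopB K (scoville.length + 1) (PySem.List.sorted scoville (fun x => x) false) 0

-- ===== PRECONDITION & SPEC =====
-- Pre_ excludes the empty list, on which A's first heappop raises IndexError.
def Pre_solution (scoville : List Int) (K : Int) : Prop := scoville ≠ []
instance (scoville : List Int) (K : Int) : Decidable (Pre_solution scoville K) := by unfold Pre_solution; infer_instance
def pvWitness_solution : List Int × Int := ([1, 2, 3, 9, 10, 12], 7)

def Spec_solution (scoville : List Int) (K : Int) (out : Int) : Prop := out = solution_alt scoville K
instance (scoville : List Int) (K : Int) (out : Int) : Decidable (Spec_solution scoville K out) := by unfold Spec_solution; infer_instance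

-- ===== CLAIM (what is proved, stated in full; the proofs are below) =====
def Claim_equal_solution : Prop := ∀ (scoville : List Int) (K : Int), Dom_solution scoville K → Pre_solution scoville K → Spec_solution scoville K (solution scoville K)

-- ===== LEMMAS AND PROOFS =====

def PHeap.toMS : PHeap → Multiset Int
  | .nil => 0
  | .node v l r => v ::ₘ (l.toMS + r.toMS)

def PHeap.IsHeap : PHeap → Prop
  | .nil => True
  | .node v l r => (∀ x ∈ l.toMS + r.toMS, v ≤ x) ∧ l.IsHeap ∧ r.IsHeap

theorem PHeap.toMS_mergeF : ∀ (fuel : Nat) (a b : PHeap), a.size + b.size < fuel →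
    (PHeap.mergeF fuel a b).toMS = a.toMS + b.toMS := by
  intro fuel a b
  induction fuel, a, b using PHeap.mergeF.induct with
  | case1 a b => intro h; omega
  | case2 fuel h => intro _; simp [PHeap.mergeF, PHeap.toMS]
  | case3 fuel h hne => intro _; cases h <;> simp_all [PHeap.mergeF, PHeap.toMS]
  | case4 fuel a l1 r1 b l2 r2 hab ih =>
      intro hlt
      simp only [PHeap.size] at hlt
      simp only [PHeap.mergeF, hab, if_true, PHeap.toMS,
        ih (by simp [PHeap.size]; omega), ← Multiset.singleton_add]
      simp only [add_comm, add_left_comm, add_assoc]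
  | case5 fuel a l1 r1 b l2 r2 hab ih =>
      intro hlt
      simp only [PHeap.size] at hlt
      simp only [PHeap.mergeF, hab, if_false, PHeap.toMS,
        ih (by simp [PHeap.size]; omega), ← Multiset.singleton_add]
      simp only [add_comm, add_left_comm, add_assoc]

theorem PHeap.toMS_merge (a b : PHeap) : (PHeap.merge a b).toMS = a.toMS + b.toMS :=
  PHeap.toMS_mergeF _ a b (by omega)

theorem PHeap.mem_toMS_node {x v : Int} {l r : PHeap} :
    x ∈ (PHeap.node v l r).toMS ↔ x = v ∨ x ∈ l.toMS ∨ x ∈ r.toMS := by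
  simp [PHeap.toMS]

theorem PHeap.isHeap_mergeF : ∀ (fuel : Nat) (a b : PHeap), a.size + b.size < fuel →
    a.IsHeap → b.IsHeap → (PHeap.mergeF fuel a b).IsHeap := by
  intro fuel a b
  induction fuel, a, b using PHeap.mergeF.induct with
  | case1 a b => intro h; omega
  | case2 fuel h => intro _ _ hb; simpa [PHeap.mergeF]
  | case3 fuel h hne => intro _ ha _; cases h <;> simp_all [PHeap.mergeF]
  | case4 fuel a l1 r1 b l2 r2 hab ih =>
      intro hlt ha hb
      obtain ⟨ha1, hal, har⟩ := ha
      simp only [PHeap.size] at hlt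
      simp only [PHeap.mergeF, hab, if_true]
      refine ⟨?_, ih (by simp [PHeap.size]; omega) har hb, hal⟩
      intro x hx
      rw [Multiset.mem_add, PHeap.toMS_mergeF _ _ _ (by simp [PHeap.size]; omega),
        Multiset.mem_add, PHeap.mem_toMS_node] at hx
      obtain ⟨hb1, _, _⟩ := hb
      rcases hx with (hx | rfl | hx | hx) | hx
      · exact ha1 x (by simp [hx])
      · exact hab
      · exact le_trans hab (hb1 x (by simp [hx]))
      · exact le_trans hab (hb1 x (by simp [hx]))
      · exact ha1 x (by simp [hx])
  | case5 fuel a l1 r1 b l2 r2 hab ih =>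
      intro hlt ha hb
      obtain ⟨hb1, hbl, hbr⟩ := hb
      simp only [PHeap.size] at hlt
      simp only [PHeap.mergeF, hab, if_false]
      refine ⟨?_, ih (by simp [PHeap.size]; omega) hbr ha, hbl⟩
      intro x hx
      rw [Multiset.mem_add, PHeap.toMS_mergeF _ _ _ (by simp [PHeap.size]; omega),
        Multiset.mem_add, PHeap.mem_toMS_node] at hx
      obtain ⟨ha1, _, _⟩ := ha
      have hba : b ≤ a := by omega
      rcases hx with (hx | rfl | hx | hx) | hx
      · exact hb1 x (by simp [hx])
      · exact hba
      · exact le_trans hba (ha1 x (by simp [hx]))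
      · exact le_trans hba (ha1 x (by simp [hx]))
      · exact hb1 x (by simp [hx])

theorem PHeap.isHeap_merge (a b : PHeap) (ha : a.IsHeap) (hb : b.IsHeap) :
    (PHeap.merge a b).IsHeap :=
  PHeap.isHeap_mergeF _ a b (by omega) ha hb

theorem PHeap.root_le {v : Int} {l r : PHeap} (h : (PHeap.node v l r).IsHeap) :
    ∀ x ∈ (PHeap.node v l r).toMS, v ≤ x := by
  intro x hx
  simp [PHeap.toMS] at hx
  rcases hx with h1 | h1 | h1
  · omega
  · exact h.1 x (by simp [h1])
  · exact h.1 x (by simp [h1])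

theorem foldl_push_toMS (xs : List Int) : ∀ h : PHeap,
    (xs.foldl (fun h x => PHeap.push x h) h).toMS = h.toMS + ↑xs := by
  induction xs with
  | nil => intro h; simp
  | cons x xs ih =>
      intro h
      rw [List.foldl_cons, ih]
      simp only [PHeap.push, PHeap.toMS_merge, PHeap.toMS, ← Multiset.cons_coe,
        ← Multiset.singleton_add]
      simp only [add_comm, add_left_comm, add_zero, zero_add]

theorem heapify_toMS (xs : List Int) : (PHeap.heapify xs).toMS = ↑xs := by
  simpa [PHeap.toMS] using foldl_push_toMS xs .nil

theorem heapify_isHeap (xs : List Int) : (PHeap.heapify xs).IsHeap := by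
  have : ∀ h : PHeap, h.IsHeap → (xs.foldl (fun h x => PHeap.push x h) h).IsHeap := by
    induction xs with
    | nil => intro h hh; simpa
    | cons x xs ih =>
        intro h hh
        simp only [List.foldl_cons]
        exact ih _ (PHeap.isHeap_merge _ _ ⟨by simp [PHeap.toMS], trivial, trivial⟩ hh)
  exact this .nil trivial

theorem mem_insSorted {z x : Int} {l : List Int} : z ∈ insSorted x l ↔ z = x ∨ z ∈ l := by
  induction l with
  | nil => simp [insSorted]
  | cons y ys ih => simp only [insSorted]; split <;> (simp [ih]; try tauto)

theorem insSorted_coe (x : Int) (l : List Int) :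
    ((insSorted x l : List Int) : Multiset Int) = x ::ₘ ↑l := by
  induction l with
  | nil => simp [insSorted]
  | cons y ys ih =>
      simp only [insSorted]; split
      · rw [show ((y :: insSorted x ys : List Int) : Multiset Int) = y ::ₘ ((insSorted x ys : List Int) : Multiset Int) from rfl, ih, Multiset.cons_swap]
        rfl
      · rfl


theorem insSorted_pairwise (x : Int) (l : List Int) (hl : l.Pairwise (· ≤ ·)) :
    (insSorted x l).Pairwise (· ≤ ·) := by
  induction l with
  | nil => simp [insSorted]
  | cons y ys ih =>
      simp only [insSorted]
      rcases List.pairwise_cons.mp hl with ⟨hy, hys⟩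
      split
      · rename_i hlt
        refine List.pairwise_cons.mpr ⟨?_, ih hys⟩
        intro z hz
        rcases mem_insSorted.mp hz with rfl | hz
        · omega
        · exact hy z hz
      · rename_i hge
        refine List.pairwise_cons.mpr ⟨?_, hl⟩
        intro z hz
        rcases List.mem_cons.mp hz with rfl | hz
        · omega
        · exact le_trans (by omega) (hy z hz)


theorem loop_eq (K : Int) : ∀ (fuel : Nat) (h : PHeap) (s : List Int) (cnt : Int),
    h.toMS.card < fuel → h.IsHeap → s.Pairwise (· ≤ ·) → h.toMS = ↑s →
    loopA K fuel h cnt = loopB K fuel s cnt := by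
  intro fuel
  induction fuel with
  | zero => intro h s cnt hcard _ _ _; omega
  | succ n ih =>
      intro h s cnt hcard hh hs hms
      cases h with
      | nil =>
        have hsnil : s = [] := by
          have : ((s : Multiset Int)).card = 0 := by rw [← hms]; simp [PHeap.toMS]
          simpa using this
        subst hsnil
        rfl
      | node v l r =>
        cases s with
        | nil =>
            exfalso
            have := congrArg Multiset.card hms
            simp [PHeap.toMS] at this
        | cons f rest =>
          have hvf : v = f := by
            have h1 : v ≤ f := PHeap.root_le hh f (by rw [hms]; exact_mod_cast List.mem_cons_self ..)
            have h2 : f ≤ v := by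
              have hv : v ∈ (((f :: rest : List Int)) : Multiset Int) := by
                rw [← hms]; simp [PHeap.toMS]
              rcases List.mem_cons.mp (by exact_mod_cast hv) with rfl | hv
              · omega
              · exact (List.pairwise_cons.mp hs).1 v hv
            omega
          subst hvf
          have hrest : (PHeap.merge l r).toMS = ↑rest := by
            rw [PHeap.toMS_merge]
            have : (PHeap.node v l r).toMS = ↑(v :: rest) := hms
            simp only [PHeap.toMS, ← Multiset.cons_coe] at this
            exact (Multiset.cons_inj_right v).mp this
          simp only [loopA, loopB]
          by_cases hK : v ≥ K
          · rw [if_pos hK, if_neg (by omega)]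
          · have hKlt : v < K := by omega
            rw [if_neg hK, if_pos hKlt]
            cases hmlr : PHeap.merge l r with
            | nil =>
                have : rest = [] := by
                  rw [hmlr] at hrest
                  simpa [PHeap.toMS, eq_comm] using hrest.symm
                subst this; rfl
            | node v2 l2 r2 =>
                have hheap2 : (PHeap.node v2 l2 r2).IsHeap := by
                  rw [← hmlr]; exact PHeap.isHeap_merge _ _ hh.2.1 hh.2.2
                have hms2 : (PHeap.node v2 l2 r2).toMS = ↑rest := by rw [← hmlr]; exact hrest
                cases rest with
                | nil =>
                    exfalso
                    have := congrArg Multiset.card hms2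
                    simp [PHeap.toMS] at this
                | cons s2 rest2 =>
                    have hv2 : v2 = s2 := by
                      have h1 : v2 ≤ s2 := PHeap.root_le hheap2 s2
                        (by rw [hms2]; exact_mod_cast List.mem_cons_self ..)
                      have h2 : s2 ≤ v2 := by
                        have hv : v2 ∈ (((s2 :: rest2 : List Int)) : Multiset Int) := by
                          rw [← hms2]; simp [PHeap.toMS]
                        rcases List.mem_cons.mp (by exact_mod_cast hv) with rfl | hv
                        · omega
                        · exact (List.pairwise_cons.mp (List.pairwise_cons.mp hs).2).1 v2 hv
                      omega
                    subst hv2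
                    have hrest2 : l2.toMS + r2.toMS = ↑rest2 := by
                      simp only [PHeap.toMS, ← Multiset.cons_coe] at hms2
                      exact (Multiset.cons_inj_right v2).mp hms2
                    show loopA K n (PHeap.push (v + v2 * 2) (PHeap.merge l2 r2)) (cnt + 1) =
                      loopB K n (insSorted (v + v2 * 2) rest2) (cnt + 1)
                    apply ih
                    · have h1 := congrArg Multiset.card hms2
                      have h2 := congrArg Multiset.card hms
                      simp only [PHeap.toMS, Multiset.card_cons, Multiset.card_add,
                        Multiset.coe_card, List.length_cons] at h1 h2 hcard
                      rw [PHeap.push, PHeap.toMS_merge, PHeap.toMS_merge]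
                      simp only [PHeap.toMS, Multiset.card_add, Multiset.card_cons,
                        Multiset.card_zero]
                      omega
                    · exact PHeap.isHeap_merge _ _ ⟨by simp [PHeap.toMS], trivial, trivial⟩
                        (PHeap.isHeap_merge _ _ hheap2.2.1 hheap2.2.2)
                    · exact insSorted_pairwise _ _ (List.pairwise_cons.mp (List.pairwise_cons.mp hs).2).2
                    · rw [PHeap.push, PHeap.toMS_merge, PHeap.toMS_merge, insSorted_coe, hrest2]
                      simp [PHeap.toMS]

-- ===== VERDICT (by name: the statement is the Claim_ definition above) =====
theorem solution_spec : Claim_equal_solution := by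
  intro scoville K _ _
  unfold Spec_solution solution solution_alt
  apply loop_eq
  · rw [heapify_toMS]; simp
  · exact heapify_isHeap _
  · simpa using PySem.List.sorted_pairwise scoville (fun x => x)
  · rw [heapify_toMS]
    exact_mod_cast (Multiset.coe_eq_coe.mpr (PySem.List.sorted_perm scoville (fun x => x) false)).symm
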